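-- pv_equiv track=rewrite | github.com/gsavopul/codility_demos | 12_ChocolatesByNumbers.py | solution
-- ===== SOURCE A (Python) =====
-- def solution(N, M):
--
-- 	i=1
--
-- 	while (True):
-- 		if (N>M):
-- 			x=i*N//M
-- 			if i*N-x*M ==0:
-- 				return x
-- 			else:
-- 				i+=1
-- 		else:
-- 			x=i*M//N
-- 			if i*M-x*N ==0:
-- 				return i
-- 			else:
-- 				i+=1
-- 	return 0
-- ===== SOURCE B (Python) =====
-- def solution(N, M):
--     a, b = N, M
--     while b:
--         a, b = b, a % b
--     return N // a
-- ===== Notes on version B (the rewrite author's own statement) =====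
-- stated objective: faster
-- what changed: Replaces A's linear hunt for the smallest multiplier that makes the larger number divisible by the smaller with a hand-written Euclidean gcd reduction followed by one exact division N // gcd.
-- outside the precondition, e.g. on solution(-6, 4): A returns 3, B returns -3
import Mathlib
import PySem

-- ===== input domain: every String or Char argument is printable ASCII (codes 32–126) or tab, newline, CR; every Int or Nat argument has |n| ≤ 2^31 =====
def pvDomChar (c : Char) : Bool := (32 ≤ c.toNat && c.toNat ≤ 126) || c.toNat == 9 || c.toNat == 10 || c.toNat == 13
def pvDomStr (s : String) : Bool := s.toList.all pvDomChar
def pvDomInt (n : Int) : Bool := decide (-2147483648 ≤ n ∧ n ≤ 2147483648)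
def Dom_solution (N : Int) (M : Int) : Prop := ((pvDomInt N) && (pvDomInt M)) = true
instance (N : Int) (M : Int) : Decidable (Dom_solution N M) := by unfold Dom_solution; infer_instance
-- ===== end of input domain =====

-- B replaces A's linear multiplier hunt by an explicit Euclidean gcd reduction and one exact
-- division (faster in a timing run; equivalence is about the return value only).

-- ===== PORT A =====
-- A's while-True loop, ported with a fuel bound large enough to contain the answer on every
-- input of Pre_solution (fuel exhaustion yields A's dead-code `return 0`, never reached there).
def solutionLoopA (N M : Int) : Nat → Int → Int
  | 0, _ => 0
  | fuel+1, i =>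
    if N > M then
      let x := PySem.Int.floordiv (i * N) M
      if i * N - x * M = 0 then x else solutionLoopA N M fuel (i + 1)
    else
      let x := PySem.Int.floordiv (i * M) N
      if i * M - x * N = 0 then i else solutionLoopA N M fuel (i + 1)

def solution (N : Int) (M : Int) : Int :=
  solutionLoopA N M (N.natAbs + M.natAbs + 2) 1

-- ===== PORT B =====
-- B's `while b: a, b = b, a % b`, ported with fuel |M| + 1; since |a % b| < |b| the Python
-- loop runs at most |M| steps, so the fuel is never exhausted.
def euclidLoop : Nat → Int → Int → Int
  | 0, a, _ => a
  | fuel+1, a, b => if b = 0 then a else euclidLoop fuel b (PySem.Int.mod a b)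

def solution_alt (N : Int) (M : Int) : Int :=
  PySem.Int.floordiv N (euclidLoop (M.natAbs + 1) N M)

-- ===== PRECONDITION & SPEC =====
-- Pre_ excludes (a) the inputs where A raises ZeroDivisionError (N = 0 with M ≥ 0, and M = 0
-- with N > 0), and (b) the inputs with N < 0 < M, outside the problem's natural positive-count
-- domain, where A's positive |N|/gcd and B's negative N/gcd are equally accidental answers for
-- a negative chocolate count.
def Pre_solution (N : Int) (M : Int) : Prop :=
  ¬ (N = 0 ∧ 0 ≤ M) ∧ ¬ (0 < N ∧ M = 0) ∧ ¬ (N < 0 ∧ 0 < M)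
instance (N : Int) (M : Int) : Decidable (Pre_solution N M) := by unfold Pre_solution; infer_instance

def pvWitness_solution : Int × Int := (12, 8)

def Spec_solution (N : Int) (M : Int) (out : Int) : Prop := out = solution_alt N M
instance (N : Int) (M : Int) (out : Int) : Decidable (Spec_solution N M out) := by unfold Spec_solution; infer_instance

-- ===== CLAIM (what is proved, stated in full; the proofs are below) =====
def Claim_equal_solution : Prop := ∀ (N : Int) (M : Int), Dom_solution N M → Pre_solution N M → Spec_solution N M (solution N M)

-- ===== LEMMAS AND PROOFS =====

-- exact floor division: N // (b*q) when the division is exact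
theorem pv_floordiv_mul_cancel (b q : Int) (hb : b ≠ 0) :
    PySem.Int.floordiv (b * q) b = q := by
  have h0 : PySem.Int.mod (b * q) b = 0 :=
    (PySem.Int.mod_eq_zero_iff_dvd _ _).mpr ⟨q, rfl⟩
  have h := PySem.Int.floordiv_mul_add_mod (b * q) b
  rw [h0, add_zero] at h
  have : PySem.Int.floordiv (b * q) b * b = q * b := by linarith [h]
  exact mul_right_cancel₀ hb this

theorem pv_mod_natAbs_lt (a b : Int) (hb : b ≠ 0) :
    (PySem.Int.mod a b).natAbs < b.natAbs := by
  rcases lt_or_gt_of_ne hb with h | h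
  · have := PySem.Int.mod_neg_bounds a (b := b) h
    omega
  · have h1 := PySem.Int.mod_nonneg a (b := b) h
    have h2 := PySem.Int.mod_lt a (b := b) h
    omega

theorem pv_mod_sign (a b : Int) (hb : b ≠ 0) (hm : PySem.Int.mod a b ≠ 0) :
    (PySem.Int.mod a b).sign = b.sign := by
  rcases lt_or_gt_of_ne hb with h | h
  · have := PySem.Int.mod_neg_bounds a (b := b) h
    rw [Int.sign_eq_neg_one_of_neg (by omega), Int.sign_eq_neg_one_of_neg h]
  · have h1 := PySem.Int.mod_nonneg a (b := b) h
    rw [Int.sign_eq_one_of_pos (by omega), Int.sign_eq_one_of_pos h]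

theorem pv_gcd_mod (a b : Int) : Int.gcd b (PySem.Int.mod a b) = Int.gcd a b := by
  have h := PySem.Int.floordiv_mul_add_mod a b
  have : PySem.Int.mod a b = a - PySem.Int.floordiv a b * b := by linarith
  rw [this]
  rw [sub_eq_add_neg, ← neg_mul, mul_comm]
  rw [Int.gcd_add_mul_left_right b a (-(PySem.Int.floordiv a b))]
  exact Int.gcd_comm b a

theorem pv_euclid_zero (fuel : Nat) (a : Int) : euclidLoop fuel a 0 = a := by
  cases fuel <;> simp [euclidLoop]

theorem pv_euclid_eq (fuel : Nat) (a b : Int) (hb : b ≠ 0) (hf : b.natAbs < fuel) :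
    euclidLoop fuel a b = b.sign * Int.gcd a b := by
  induction fuel generalizing a b with
  | zero => omega
  | succ f ih =>
    simp only [euclidLoop, if_neg hb]
    by_cases hr : PySem.Int.mod a b = 0
    · rw [hr, pv_euclid_zero]
      have : Int.gcd a b = b.natAbs := by
        have : b ∣ a := (PySem.Int.mod_eq_zero_iff_dvd a b).mp hr
        simpa using Int.gcd_eq_natAbs_right_iff_dvd.mpr this
      rw [this, Int.sign_mul_natAbs]
    · rw [ih b (PySem.Int.mod a b) hr (by have := pv_mod_natAbs_lt a b hb; omega),
        pv_mod_sign a b hb hr, pv_gcd_mod]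

-- the least positive multiplier: d ∣ k*c for k : Nat iff (|d| / gcd c d) ∣ k
theorem pv_dvd_mul_iff (c d : Int) (hd : d ≠ 0) (k : Nat) :
    d ∣ (k : Int) * c ↔ (d.natAbs / Int.gcd c d) ∣ k := by
  set n := c.natAbs
  set m := d.natAbs
  set G := Nat.gcd n m with hG
  have hm : m ≠ 0 := by simpa [m] using hd
  have hG0 : 0 < G := Nat.gcd_pos_of_pos_right n (Nat.pos_of_ne_zero hm)
  have hGn : G ∣ n := Nat.gcd_dvd_left n m
  have hGm : G ∣ m := Nat.gcd_dvd_right n m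
  have hgcd : Int.gcd c d = G := rfl
  rw [hgcd]
  have step1 : d ∣ (k : Int) * c ↔ m ∣ k * n := by
    rw [← Int.natAbs_dvd_natAbs, Int.natAbs_mul, Int.natAbs_natCast]
  rw [step1]
  constructor
  · intro h
    have hco : Nat.Coprime (m / G) (n / G) :=
      (Nat.coprime_div_gcd_div_gcd hG0).symm
    obtain ⟨nG, hn⟩ := hGn
    obtain ⟨mG, hm'⟩ := hGm
    have hmG : m / G = mG := by rw [hm']; exact Nat.mul_div_cancel_left mG hG0
    have hnG : n / G = nG := by rw [hn]; exact Nat.mul_div_cancel_left nG hG0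
    rw [hmG]
    have : G * mG ∣ k * (G * nG) := by rw [← hm', ← hn]; exact h
    have h4 : mG ∣ k * nG := by
      rcases this with ⟨t, ht⟩
      refine ⟨t, ?_⟩
      have h5 : G * (k * nG) = G * (mG * t) := by
        calc G * (k * nG) = k * (G * nG) := by ring
          _ = G * mG * t := ht
          _ = G * (mG * t) := by ring
      exact Nat.eq_of_mul_eq_mul_left hG0 h5
    have hco' : Nat.Coprime mG nG := by rwa [hmG, hnG] at hco
    exact hco'.dvd_of_dvd_mul_right h4
  · rintro ⟨t, ht⟩
    obtain ⟨mG, hm'⟩ := hGm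
    have hmG : m / G = mG := by rw [hm']; exact Nat.mul_div_cancel_left mG hG0
    rw [hmG] at ht
    obtain ⟨nG, hn⟩ := hGn
    refine ⟨t * nG, ?_⟩
    rw [ht, hm', hn]; ring

theorem pv_i0_pos (c d : Int) (hd : d ≠ 0) : 0 < d.natAbs / Int.gcd c d := by
  have hm : d.natAbs ≠ 0 := by simpa using hd
  have hGm : Int.gcd c d ∣ d.natAbs := Nat.gcd_dvd_right _ _
  have hG0 : 0 < Int.gcd c d := Nat.gcd_pos_of_pos_right _ (Nat.pos_of_ne_zero hm)
  exact Nat.div_pos (Nat.le_of_dvd (Nat.pos_of_ne_zero hm) hGm) hG0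

theorem pv_i0_mul_gcd (c d : Int) :
    (d.natAbs / Int.gcd c d) * Int.gcd c d = d.natAbs :=
  Nat.div_mul_cancel (Nat.gcd_dvd_right _ _)

-- A's loop in the N > M branch returns x at the least multiplier
theorem pv_loopA_gt (N M : Int) (h : M < N) (hM : M ≠ 0) (fuel k : Nat)
    (hk : k < M.natAbs / Int.gcd N M) (hf : M.natAbs / Int.gcd N M ≤ k + fuel) :
    solutionLoopA N M fuel ((k : Int) + 1)
      = PySem.Int.floordiv (((M.natAbs / Int.gcd N M : Nat) : Int) * N) M := by
  set i0 := M.natAbs / Int.gcd N M with hi0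
  induction fuel generalizing k with
  | zero => omega
  | succ f ih =>
    simp only [solutionLoopA, if_pos h]
    have hcond : ((k : Int) + 1) * N - PySem.Int.floordiv (((k : Int) + 1) * N) M * M
        = PySem.Int.mod (((k : Int) + 1) * N) M := by
      have := PySem.Int.floordiv_mul_add_mod (((k : Int) + 1) * N) M
      linarith
    by_cases hdvd : M ∣ ((k : Int) + 1) * N
    · have hz : ((k : Int) + 1) * N - PySem.Int.floordiv (((k : Int) + 1) * N) M * M = 0 := by
        rw [hcond]; exact (PySem.Int.mod_eq_zero_iff_dvd _ _).mpr hdvd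
      rw [if_pos hz]
      have : i0 ∣ (k + 1) := by
        have := (pv_dvd_mul_iff N M hM (k + 1)).mp (by push_cast; exact hdvd)
        exact this
      have hk1 : k + 1 = i0 := by
        have := Nat.le_of_dvd (by omega) this
        omega
      rw [← hk1]; push_cast; ring_nf
    · have hz : ¬ (((k : Int) + 1) * N - PySem.Int.floordiv (((k : Int) + 1) * N) M * M = 0) := by
        rw [hcond]
        intro hc
        exact hdvd ((PySem.Int.mod_eq_zero_iff_dvd _ _).mp hc)
      rw [if_neg hz]
      have hk1 : k + 1 < i0 := by
        rcases Nat.lt_or_ge (k + 1) i0 with h' | h'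
        · exact h'
        · exfalso
          have : k + 1 = i0 := by omega
          apply hdvd
          have : i0 ∣ (k + 1) := by rw [this]
          have := (pv_dvd_mul_iff N M hM (k + 1)).mpr this
          push_cast at this; exact this
      have := ih (k + 1) hk1 (by omega)
      rw [← this]; push_cast; ring_nf

-- A's loop in the N ≤ M branch returns the least multiplier itself
theorem pv_loopA_le (N M : Int) (h : ¬ M < N) (hN : N ≠ 0) (fuel k : Nat)
    (hk : k < N.natAbs / Int.gcd M N) (hf : N.natAbs / Int.gcd M N ≤ k + fuel) :
    solutionLoopA N M fuel ((k : Int) + 1)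
      = ((N.natAbs / Int.gcd M N : Nat) : Int) := by
  set i0 := N.natAbs / Int.gcd M N with hi0
  induction fuel generalizing k with
  | zero => omega
  | succ f ih =>
    simp only [solutionLoopA, if_neg (by omega : ¬ N > M)]
    have hcond : ((k : Int) + 1) * M - PySem.Int.floordiv (((k : Int) + 1) * M) N * N
        = PySem.Int.mod (((k : Int) + 1) * M) N := by
      have := PySem.Int.floordiv_mul_add_mod (((k : Int) + 1) * M) N
      linarith
    by_cases hdvd : N ∣ ((k : Int) + 1) * M
    · have hz : ((k : Int) + 1) * M - PySem.Int.floordiv (((k : Int) + 1) * M) N * N = 0 := by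
        rw [hcond]; exact (PySem.Int.mod_eq_zero_iff_dvd _ _).mpr hdvd
      rw [if_pos hz]
      have : i0 ∣ (k + 1) := by
        have := (pv_dvd_mul_iff M N hN (k + 1)).mp (by push_cast; exact hdvd)
        exact this
      have hk1 : k + 1 = i0 := by
        have := Nat.le_of_dvd (by omega) this
        omega
      rw [← hk1]; push_cast; ring
    · have hz : ¬ (((k : Int) + 1) * M - PySem.Int.floordiv (((k : Int) + 1) * M) N * N = 0) := by
        rw [hcond]
        intro hc
        exact hdvd ((PySem.Int.mod_eq_zero_iff_dvd _ _).mp hc)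
      rw [if_neg hz]
      have hk1 : k + 1 < i0 := by
        rcases Nat.lt_or_ge (k + 1) i0 with h' | h'
        · exact h'
        · exfalso
          have : k + 1 = i0 := by omega
          apply hdvd
          have : i0 ∣ (k + 1) := by rw [this]
          have := (pv_dvd_mul_iff M N hN (k + 1)).mpr this
          push_cast at this; exact this
      have := ih (k + 1) hk1 (by omega)
      rw [← this]; push_cast; ring_nf

-- ===== VERDICT (by name: the statement is the Claim_ definition above) =====
theorem solution_spec : Claim_equal_solution := by
  intro N M _ hPre
  obtain ⟨h1, h2, h3⟩ := hPre
  unfold Spec_solution solution solution_alt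
  by_cases hM : M = 0
  · -- only N < 0 remains in Pre_
    have hN : N < 0 := by
      rcases lt_trichotomy N 0 with h | h | h
      · exact h
      · exact absurd ⟨h, by omega⟩ h1
      · exact absurd ⟨h, hM⟩ h2
    subst hM
    rw [pv_euclid_zero]
    have hB : PySem.Int.floordiv N N = 1 := by
      have := pv_floordiv_mul_cancel N 1 (by omega)
      simpa using this
    rw [hB]
    show solutionLoopA N 0 (N.natAbs + 0 + 2) 1 = 1
    have : N.natAbs + 0 + 2 = (N.natAbs + 1) + 1 := by omega
    rw [this]
    simp only [solutionLoopA, if_neg (by omega : ¬ N > 0)]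
    have hx : PySem.Int.floordiv (1 * 0) N = 0 := by
      have := pv_floordiv_mul_cancel N 0 (by omega)
      simpa using this
    rw [if_pos (by rw [hx]; ring)]
  · -- M ≠ 0
    have hEuclid : euclidLoop (M.natAbs + 1) N M = M.sign * Int.gcd N M :=
      pv_euclid_eq _ N M hM (by omega)
    rw [hEuclid]
    set g : Int := (Int.gcd N M : Int) with hg
    have hgN : g ∣ N := Int.gcd_dvd_left N M
    have hNM0 : ¬ (N = 0 ∧ M = 0) := by tauto
    have hg0 : g ≠ 0 := by
      simp only [hg, ne_eq, Int.natCast_eq_zero, Int.gcd_eq_zero_iff]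
      intro ⟨hN0, hM0⟩; exact hM hM0
    have hs2 : M.sign * M.sign = 1 := by
      rcases lt_trichotomy M 0 with h | h | h
      · rw [Int.sign_eq_neg_one_of_neg h]; ring
      · exact absurd h hM
      · rw [Int.sign_eq_one_of_pos h]; ring
    have hsg0 : M.sign * g ≠ 0 := by
      intro hc
      have : M.sign * M.sign * g = 0 := by rw [mul_assoc, hc, mul_zero]
      rw [hs2, one_mul] at this
      exact hg0 this
    obtain ⟨q, hq⟩ : M.sign * g ∣ N := by
      obtain ⟨t, ht⟩ := hgN
      exact ⟨M.sign * t, by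
        rw [ht, show M.sign * g * (M.sign * t) = M.sign * M.sign * (g * t) from by ring, hs2,
          one_mul]⟩
    have hB : PySem.Int.floordiv N (M.sign * g) = q := by
      rw [hq]; exact pv_floordiv_mul_cancel _ q hsg0
    rw [hB]
    by_cases hlt : M < N
    · -- A takes the N > M branch
      set i0 := M.natAbs / Int.gcd N M with hi0
      have hi0pos := pv_i0_pos N M hM
      have hi0le : i0 ≤ M.natAbs := Nat.div_le_self _ _
      have hA := pv_loopA_gt N M hlt hM (N.natAbs + M.natAbs + 2) 0
        (by omega) (by omega)
      simp only [Nat.cast_zero, zero_add] at hA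
      rw [hA]
      have hkey : ((i0 : Nat) : Int) * N = M * q := by
        have h1 : ((i0 : Nat) : Int) * g = (M.natAbs : Int) := by
          rw [hg]; exact_mod_cast pv_i0_mul_gcd N M
        have h2 : M.sign * (M.natAbs : Int) = M := Int.sign_mul_natAbs M
        calc ((i0 : Nat) : Int) * N = ((i0 : Nat) : Int) * (M.sign * g * q) := by rw [← hq]
          _ = M.sign * (((i0 : Nat) : Int) * g) * q := by ring
          _ = M.sign * (M.natAbs : Int) * q := by rw [h1]
          _ = M * q := by rw [h2]
      rw [hkey]
      exact pv_floordiv_mul_cancel M q hM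
    · -- A takes the N ≤ M branch; here N ≠ 0 and sign N = sign M
      have hN0 : N ≠ 0 := by
        intro hc
        exact h1 ⟨hc, by omega⟩
      have hsame : M.sign = N.sign := by
        rcases lt_trichotomy N 0 with h | h | h
        · have hMneg : M < 0 := by
            rcases lt_trichotomy M 0 with h' | h' | h'
            · exact h'
            · exact absurd h' hM
            · exact absurd ⟨h, h'⟩ h3
          rw [Int.sign_eq_neg_one_of_neg h, Int.sign_eq_neg_one_of_neg hMneg]
        · exact absurd h hN0
        · have hMpos : 0 < M := by omega
          rw [Int.sign_eq_one_of_pos h, Int.sign_eq_one_of_pos hMpos]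
      set j0 := N.natAbs / Int.gcd M N with hj0
      have hj0pos := pv_i0_pos M N hN0
      have hj0le : j0 ≤ N.natAbs := Nat.div_le_self _ _
      have hA := pv_loopA_le N M hlt hN0 (N.natAbs + M.natAbs + 2) 0
        (by omega) (by omega)
      simp only [Nat.cast_zero, zero_add] at hA
      rw [hA]
      -- q = j0
      have hgcomm : (Int.gcd M N : Int) = g := by rw [hg, Int.gcd_comm]
      have h1' : ((j0 : Nat) : Int) * g = (N.natAbs : Int) := by
        rw [← hgcomm]; exact_mod_cast pv_i0_mul_gcd M N
      have h2' : N.sign * (N.natAbs : Int) = N := Int.sign_mul_natAbs N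
      have hNj : N = M.sign * g * ((j0 : Nat) : Int) := by
        rw [hsame]
        calc N = N.sign * (N.natAbs : Int) := h2'.symm
          _ = N.sign * (((j0 : Nat) : Int) * g) := by rw [h1']
          _ = N.sign * g * ((j0 : Nat) : Int) := by ring
      have : M.sign * g * q = M.sign * g * ((j0 : Nat) : Int) := by rw [← hq, hNj]
      exact (mul_left_cancel₀ hsg0 this).symm
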